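-- pv_equiv track=rewrite | github.com/mihneagiurgea/pysandbox | topcoder/maximum_diameter.py | maximumDiameter
-- ===== SOURCE A (Python) =====
-- def maximumDiameter(cnt):
--     """
--
--     >>> obj = TheTree()
--     >>> obj.maximumDiameter((3, ))
--     2
--     >>> obj.maximumDiameter((2, 2))
--     4
--     >>> obj.maximumDiameter((4, 1, 2, 4))
--     5
--     >>> obj.maximumDiameter((4, 2, 1, 3, 2, 5, 7, 2, 4, 5, 2, 3, 1, 13, 6))
--     21
--     """
--     D = len(cnt)
--     result = D
--     next_stop = D
--     for i in range(len(cnt)-1, -1, -1):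
--         if cnt[i] == 1:
--             next_stop = i
--         else:
--             diam = next_stop - i + D - i
--             result = max(result, diam)
--     return result
-- ===== SOURCE B (Python) =====
-- def maximumDiameter(cnt):
--     D = len(cnt)
--     # pass 1: next_one[i] = smallest j > i with cnt[j] == 1, or D if none (backward fill)
--     next_one = []
--     ns = D
--     for i in range(D - 1, -1, -1):
--         next_one.append(ns)
--         if cnt[i] == 1:
--             ns = i
--     next_one.reverse()
--     # pass 2: forward max over positions whose count is not 1
--     result = D
--     for i, (c, nx) in enumerate(zip(cnt, next_one)):
--         if c != 1:
--             result = max(result, nx - i + D - i)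
--     return result
-- ===== Notes on version B (the rewrite author's own statement) =====
-- stated objective: alternative
-- what changed: Replaces A's single fused reverse scan (running next-1 index and running max in one state) by two separate passes: a backward fill that materializes the next_one table, then a forward max pass over enumerate(zip(cnt, next_one)).
import Mathlib
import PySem

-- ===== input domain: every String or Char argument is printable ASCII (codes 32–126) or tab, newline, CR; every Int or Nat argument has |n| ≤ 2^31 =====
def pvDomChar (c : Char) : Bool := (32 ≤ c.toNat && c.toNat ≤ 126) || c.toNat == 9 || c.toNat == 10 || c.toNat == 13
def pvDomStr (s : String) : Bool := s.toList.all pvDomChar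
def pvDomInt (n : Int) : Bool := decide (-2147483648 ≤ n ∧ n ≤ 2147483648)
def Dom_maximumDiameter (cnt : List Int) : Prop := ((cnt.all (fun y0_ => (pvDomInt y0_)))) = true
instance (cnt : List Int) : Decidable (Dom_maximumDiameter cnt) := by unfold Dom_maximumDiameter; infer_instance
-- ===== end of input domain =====

-- B replaces A's fused reverse scan by two passes: first materialize the next_one table
-- (backward fill), then a forward max pass over it — same O(n) cost, different decomposition.

-- ===== PORT A =====
def maximumDiameter (cnt : List Int) : Int :=
  let D : Int := cnt.length
  let st :=
    (PySem.List.pyRange (D - 1) (-1) (-1)).foldl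
      (fun (st : Int × Int) (i : Int) =>
        if PySem.List.pyGetD cnt i 0 == 1 then (st.1, i)
        else (max st.1 (st.2 - i + D - i), st.2))
      (D, D)
  st.1

-- ===== PORT B =====
def maximumDiameter_alt (cnt : List Int) : Int :=
  let D : Int := cnt.length
  -- pass 1: backward fill of next_one (next_one.insert(0, ns) = prepend)
  let build :=
    (PySem.List.pyRange (D - 1) (-1) (-1)).foldl
      (fun (st : Int × List Int) (i : Int) =>
        (if PySem.List.pyGetD cnt i 0 == 1 then i else st.1, st.2 ++ [st.1]))
      (D, [])
  let nextOne := build.2.reverse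
  -- pass 2: forward max over enumerate(zip(cnt, next_one))
  (PySem.List.enumerate (cnt.zip nextOne) 0).foldl
    (fun (r : Int) (p : Int × Int × Int) =>
      if p.2.1 != 1 then max r (p.2.2 - p.1 + D - p.1) else r)
    D

-- ===== PRECONDITION & SPEC =====
def Spec_maximumDiameter (cnt : List Int) (out : Int) : Prop := out = maximumDiameter_alt cnt
instance (cnt : List Int) (out : Int) : Decidable (Spec_maximumDiameter cnt out) := by unfold Spec_maximumDiameter; infer_instance

-- ===== CLAIM (what is proved, stated in full; the proofs are below) =====
def Claim_equal_maximumDiameter : Prop := ∀ (cnt : List Int), Dom_maximumDiameter cnt → Spec_maximumDiameter cnt (maximumDiameter cnt)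

-- ===== LEMMAS AND PROOFS =====

-- A's loop body and a structural countdown form of A's loop (processes indices k-1, …, 0)
def pvStepA (cnt : List Int) (s : Int × Int) (i : Int) : Int × Int :=
  if PySem.List.pyGetD cnt i 0 == 1 then (s.1, i)
  else (max s.1 (s.2 - i + (cnt.length : Int) - i), s.2)

def pvLoopA (cnt : List Int) : Nat → Int × Int → Int × Int
  | 0, s => s
  | k+1, s => pvLoopA cnt k (pvStepA cnt s k)

-- B's build-loop body (as in the port: append) and countdown form
def pvStepB2 (cnt : List Int) (s : Int × List Int) (i : Int) : Int × List Int :=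
  (if PySem.List.pyGetD cnt i 0 == 1 then i else s.1, s.2 ++ [s.1])

def pvLoopB2 (cnt : List Int) : Nat → Int × List Int → Int × List Int
  | 0, s => s
  | k+1, s => pvLoopB2 cnt k (pvStepB2 cnt s k)

-- prepend variant of the build loop (its .2 is the reversal of pvLoopB2's)
def pvStepB (cnt : List Int) (s : Int × List Int) (i : Int) : Int × List Int :=
  (if PySem.List.pyGetD cnt i 0 == 1 then i else s.1, s.1 :: s.2)

def pvLoopB (cnt : List Int) : Nat → Int × List Int → Int × List Int
  | 0, s => s
  | k+1, s => pvLoopB cnt k (pvStepB cnt s k)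

-- B's forward pass as structural recursion over the zipped pairs
def pvFwd (D : Int) : Int → Int → List (Int × Int) → Int
  | _, r, [] => r
  | i, r, p :: t => pvFwd D (i+1) (if p.1 != 1 then max r (p.2 - i + D - i) else r) t

theorem pvLoopA_eq_foldl (cnt : List Int) (k : Nat) (s : Int × Int) :
    (PySem.List.pyRange ((k : Int) - 1) (-1) (-1)).foldl (pvStepA cnt) s = pvLoopA cnt k s := by
  induction k generalizing s with
  | zero => rw [PySem.List.pyRange_neg_one_eq_nil (by norm_num)]; rfl
  | succ k ih =>
      have h1 : ((k + 1 : Nat) : Int) - 1 = (k : Int) := by push_cast; ring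
      rw [h1, PySem.List.pyRange_neg_one_cons (by omega)]
      simp only [List.foldl_cons]
      have h2 : (k : Int) - 1 = (k : Int) - 1 := rfl
      rw [ih]
      rfl

theorem pvLoopB2_eq_foldl (cnt : List Int) (k : Nat) (s : Int × List Int) :
    (PySem.List.pyRange ((k : Int) - 1) (-1) (-1)).foldl (pvStepB2 cnt) s = pvLoopB2 cnt k s := by
  induction k generalizing s with
  | zero => rw [PySem.List.pyRange_neg_one_eq_nil (by norm_num)]; rfl
  | succ k ih =>
      have h1 : ((k + 1 : Nat) : Int) - 1 = (k : Int) := by push_cast; ring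
      rw [h1, PySem.List.pyRange_neg_one_cons (by omega)]
      simp only [List.foldl_cons]
      rw [ih]
      rfl

theorem pvFwd_eq_foldl (D : Int) (l : List (Int × Int)) (i r : Int) :
    (PySem.List.enumerate l i).foldl
      (fun (r : Int) (p : Int × Int × Int) =>
        if p.2.1 != 1 then max r (p.2.2 - p.1 + D - p.1) else r) r
      = pvFwd D i r l := by
  induction l generalizing i r with
  | nil => rw [PySem.List.enumerate_nil]; rfl
  | cons x t ih => rw [PySem.List.enumerate_cons, List.foldl_cons, ih]; rfl

theorem pvLoopB_acc (cnt : List Int) (k : Nat) (ns : Int) (acc : List Int) :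
    pvLoopB cnt k (ns, acc)
      = ((pvLoopB cnt k (ns, [])).1, (pvLoopB cnt k (ns, [])).2 ++ acc) := by
  induction k generalizing ns acc with
  | zero => rfl
  | succ k ih =>
      simp only [pvLoopB, pvStepB]
      rw [ih, ih ((if PySem.List.pyGetD cnt (k:Int) 0 == 1 then (k:Int) else ns)) [ns]]
      simp

theorem pvLoopB2_rev (cnt : List Int) (k : Nat) (ns : Int) (acc : List Int) :
    pvLoopB2 cnt k (ns, acc)
      = ((pvLoopB cnt k (ns, [])).1, acc ++ (pvLoopB cnt k (ns, [])).2.reverse) := by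
  induction k generalizing ns acc with
  | zero => simp [pvLoopB2, pvLoopB]
  | succ k ih =>
      simp only [pvLoopB2, pvStepB2, pvLoopB, pvStepB]
      rw [ih, pvLoopB_acc cnt k _ [ns]]
      simp

theorem pvLoopB_len (cnt : List Int) (k : Nat) (ns : Int) :
    (pvLoopB cnt k (ns, [])).2.length = k := by
  induction k generalizing ns with
  | zero => rfl
  | succ k ih =>
      simp only [pvLoopB, pvStepB]
      rw [pvLoopB_acc]
      simp [ih]

theorem pvFwd_append (D : Int) (zs : List (Int × Int)) (p : Int × Int) (i r : Int) :
    pvFwd D i r (zs ++ [p])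
      = (if p.1 != 1 then
           max (pvFwd D i r zs) (p.2 - (i + zs.length) + D - (i + zs.length))
         else pvFwd D i r zs) := by
  induction zs generalizing i r with
  | nil => simp [pvFwd]
  | cons z t ih =>
      simp only [List.cons_append, pvFwd, ih]
      have : i + 1 + (t.length : Int) = i + ((z :: t).length : Int) := by
        simp [List.length_cons]; ring
      rw [this]

theorem pvFwd_max (D : Int) (zs : List (Int × Int)) (i r v : Int) :
    pvFwd D i (max r v) zs = max (pvFwd D i r zs) v := by
  induction zs generalizing i r with
  | nil => rfl
  | cons z t ih =>
      simp only [pvFwd]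
      split
      · rw [show max (max r v) (z.2 - i + D - i) = max (max r (z.2 - i + D - i)) v by omega, ih]
      · exact ih (i+1) r

theorem pvMain (cnt : List Int) (k : Nat) (hk : k ≤ cnt.length) (r ns : Int) :
    (pvLoopA cnt k (r, ns)).1
      = pvFwd (cnt.length : Int) 0 r ((cnt.take k).zip (pvLoopB cnt k (ns, [])).2) := by
  induction k generalizing r ns with
  | zero => rfl
  | succ k ih =>
      have hkn : k < cnt.length := by omega
      have hget : PySem.List.pyGetD cnt (k : Int) 0 = cnt[k] :=
        PySem.List.pyGetD_ofNat (xs := cnt) (n := k) (d := 0) hkn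
      have htake : cnt.take (k+1) = cnt.take k ++ [cnt[k]] := by
        rw [List.take_add_one, List.getElem?_eq_getElem hkn]; rfl
      have hzipLen : ∀ ns' : Int,
          ((cnt.take k).zip (pvLoopB cnt k (ns', [])).2).length = k := by
        intro ns'
        simp [List.length_zip, pvLoopB_len, List.length_take, Nat.min_eq_left (le_of_lt hkn)]
      have hB : pvLoopB cnt (k+1) (ns, [])
          = pvLoopB cnt k ((if PySem.List.pyGetD cnt (k:Int) 0 == 1 then (k:Int) else ns), [ns]) := rfl
      simp only [pvLoopA, pvStepA]
      by_cases hc : cnt[k] = 1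
      · rw [hget]
        simp only [hc, beq_self_eq_true, if_true]
        rw [ih (by omega) r (k : Int), hB, hget]
        simp only [hc, beq_self_eq_true, if_true]
        rw [pvLoopB_acc cnt k (k : Int) [ns], htake,
          List.zip_append (by simp [pvLoopB_len, List.length_take, Nat.min_eq_left (le_of_lt hkn)])]
        simp only [List.zip_cons_cons, List.zip_nil_right]
        rw [pvFwd_append]
        simp [hc]
      · rw [hget]
        have hc' : (cnt[k] == 1) = false := by simp [hc]
        simp only [hc', Bool.false_eq_true, if_false]
        rw [ih (by omega) _ ns, hB, hget, hc']
        simp only [Bool.false_eq_true, if_false]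
        rw [pvLoopB_acc cnt k ns [ns], htake,
          List.zip_append (by simp [pvLoopB_len, List.length_take, Nat.min_eq_left (le_of_lt hkn)])]
        simp only [List.zip_cons_cons, List.zip_nil_right]
        rw [pvFwd_append, pvFwd_max]
        have hb' : (cnt[k] != 1) = true := by simp [hc]
        have hlen : (((cnt.take k).zip (pvLoopB cnt k (ns, [])).2).length : Int) = (k : Int) := by
          rw [hzipLen ns]
        simp only [hb', if_true, hlen]
        rw [zero_add]

-- ===== VERDICT (by name: the statement is the Claim_ definition above) =====
theorem maximumDiameter_spec : Claim_equal_maximumDiameter := by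
  intro cnt _
  unfold Spec_maximumDiameter maximumDiameter maximumDiameter_alt
  simp only []
  have ha : (fun (st : Int × Int) (i : Int) =>
      if PySem.List.pyGetD cnt i 0 == 1 then (st.1, i)
      else (max st.1 (st.2 - i + (cnt.length : Int) - i), st.2)) = pvStepA cnt := rfl
  have hb : (fun (st : Int × List Int) (i : Int) =>
      (if PySem.List.pyGetD cnt i 0 == 1 then i else st.1, st.2 ++ [st.1])) = pvStepB2 cnt := rfl
  rw [ha, hb, pvLoopA_eq_foldl, pvLoopB2_eq_foldl, pvLoopB2_rev]
  simp only [List.nil_append, List.reverse_reverse]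
  rw [pvFwd_eq_foldl, pvMain cnt cnt.length (le_refl _), List.take_length]
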